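-- pv_equiv track=rewrite | github.com/butjar/terranet | examples/160MHz_3APS/heuristic_ctrl.py | count_channel_users
-- ===== SOURCE A (Python) =====
-- def count_channel_users(cfg_option):
--     chan_users = [0] * 8
--     for i in range(0, 8):
--         num_user = 0
--         for min, max in cfg_option:
--             if min <= i <= max:
--                 num_user += 1
--
--         chan_users[i] = num_user
--     return chan_users
-- ===== SOURCE B (Python) =====
-- def count_channel_users(cfg_option):
--     delta = [0] * 9
--     for mn, mx in cfg_option:
--         lo = max(0, mn)
--         hi = min(7, mx)
--         if lo <= hi:
--             delta[lo] += 1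
--             delta[hi + 1] -= 1
--     out = []
--     run = 0
--     for j in range(8):
--         run += delta[j]
--         out.append(run)
--     return out
-- ===== Notes on version B (the rewrite author's own statement) =====
-- stated objective: alternative
-- what changed: Replaces the per-channel rescan of cfg_option (8 passes, one per channel) with a single pass building a clamped difference array of length 9 followed by one prefix-sum over the 8 channels.
import Mathlib
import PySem

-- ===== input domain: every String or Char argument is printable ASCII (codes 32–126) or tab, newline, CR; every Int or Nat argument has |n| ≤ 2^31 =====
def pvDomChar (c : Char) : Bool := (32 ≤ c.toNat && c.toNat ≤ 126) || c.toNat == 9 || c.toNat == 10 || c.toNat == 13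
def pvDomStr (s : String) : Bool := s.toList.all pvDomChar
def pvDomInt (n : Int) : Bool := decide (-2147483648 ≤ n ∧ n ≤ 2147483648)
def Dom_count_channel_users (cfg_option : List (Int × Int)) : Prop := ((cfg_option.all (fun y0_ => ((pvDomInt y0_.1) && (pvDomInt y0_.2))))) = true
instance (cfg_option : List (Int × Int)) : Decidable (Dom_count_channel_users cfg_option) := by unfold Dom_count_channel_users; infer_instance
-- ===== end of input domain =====

-- B replaces A's 8 rescans of cfg_option by a one-pass difference array plus a prefix-sum (alternative decomposition; not measurably faster at these sizes).

-- ===== PORT A =====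
-- literal port: chan_users[i] = num_user with i ∈ range(0,8), so i ≥ 0 and i.toNat is exact
def count_channel_users (cfg_option : List (Int × Int)) : List Int :=
  (PySem.List.pyRange 0 8 1).foldl
    (fun chan_users i =>
      let num_user := cfg_option.foldl
        (fun num_user p => if p.1 ≤ i ∧ i ≤ p.2 then num_user + 1 else num_user) 0
      chan_users.set i.toNat num_user)
    (List.replicate 8 0)

-- ===== PORT B =====
-- delta[j] += v   (inside the guarded branch lo ≥ 0 and hi+1 ≤ 8, so the indices are exact)
def pvBump (d : List Int) (j : Nat) (v : Int) : List Int := d.set j (d.getD j 0 + v)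

def pvStep (d : List Int) (p : Int × Int) : List Int :=
  let lo := max 0 p.1
  let hi := min 7 p.2
  if lo ≤ hi then pvBump (pvBump d lo.toNat 1) (hi.toNat + 1) (-1) else d

def count_channel_users_alt (cfg_option : List (Int × Int)) : List Int :=
  let delta := cfg_option.foldl pvStep (List.replicate 9 0)
  ((List.range 8).foldl
    (fun (s : List Int × Int) j =>
      let run := s.2 + delta.getD j 0
      (s.1 ++ [run], run))
    ([], 0)).1

-- ===== PRECONDITION & SPEC =====
def Spec_count_channel_users (cfg_option : List (Int × Int)) (out : List Int) : Prop := out = count_channel_users_alt cfg_option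
instance (cfg_option : List (Int × Int)) (out : List Int) : Decidable (Spec_count_channel_users cfg_option out) := by unfold Spec_count_channel_users; infer_instance

-- ===== CLAIM (what is proved, stated in full; the proofs are below) =====
def Claim_equal_count_channel_users : Prop := ∀ (cfg_option : List (Int × Int)), Dom_count_channel_users cfg_option → Spec_count_channel_users cfg_option (count_channel_users cfg_option)

-- ===== LEMMAS AND PROOFS =====

-- number of pairs covering channel i (A's inner loop)
def pvCnt (cfg : List (Int × Int)) (i : Int) : Int :=
  cfg.foldl (fun n p => if p.1 ≤ i ∧ i ≤ p.2 then n + 1 else n) 0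

-- prefix sum of the first i+1 cells of d
def pvPre (i : Nat) (d : List Int) : Int :=
  (List.range (i + 1)).foldl (fun a k => a + d.getD k 0) 0

theorem pvPre_eq_sum (i : Nat) (d : List Int) :
    pvPre i d = ∑ k ∈ Finset.range (i + 1), d.getD k 0 := by
  unfold pvPre
  induction i with
  | zero => simp
  | succ n ih =>
      rw [List.range_succ, List.foldl_append, Finset.sum_range_succ, ← ih]
      simp

theorem length_pvStep (d : List Int) (p : Int × Int) : (pvStep d p).length = d.length := by
  unfold pvStep pvBump
  dsimp only
  split <;> simp

theorem length_foldl_pvStep (cfg : List (Int × Int)) (d : List Int) :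
    (cfg.foldl pvStep d).length = d.length := by
  induction cfg generalizing d with
  | nil => rfl
  | cons p t ih => simp [List.foldl, ih, length_pvStep]

theorem getD_pvBump (d : List Int) (j : Nat) (v : Int) (k : Nat) (hj : j < d.length) :
    (pvBump d j v).getD k 0 = d.getD k 0 + (if k = j then v else 0) := by
  unfold pvBump
  by_cases h : k = j
  · subst h
    simp [List.getD, List.getElem?_set_self hj, List.getElem?_eq_getElem hj]
  · simp [List.getD, List.getElem?_set_ne (by omega : j ≠ k), h]

theorem pvPre_pvBump (i : Nat) (d : List Int) (j : Nat) (v : Int) (hj : j < d.length) :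
    pvPre i (pvBump d j v) = pvPre i d + (if j ≤ i then v else 0) := by
  rw [pvPre_eq_sum, pvPre_eq_sum]
  have : ∀ k, (pvBump d j v).getD k 0 = d.getD k 0 + (if k = j then v else 0) :=
    fun k => getD_pvBump d j v k hj
  simp only [this, Finset.sum_add_distrib, Finset.sum_ite_eq' (Finset.range (i + 1))]
  simp [Finset.mem_range]

theorem pvPre_pvStep (i : Nat) (d : List Int) (p : Int × Int)
    (hd : d.length = 9) (hi : i < 8) :
    pvPre i (pvStep d p) = pvPre i d + (if p.1 ≤ (i : Int) ∧ (i : Int) ≤ p.2 then 1 else 0) := by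
  unfold pvStep
  by_cases h : max 0 p.1 ≤ min 7 p.2
  · have hlo : (max 0 p.1).toNat < d.length := by omega
    have hhi : (min 7 p.2).toNat + 1 < (pvBump d (max 0 p.1).toNat 1).length := by
      unfold pvBump; simp only [List.length_set]; omega
    rw [if_pos h, pvPre_pvBump _ _ _ _ hhi, pvPre_pvBump _ _ _ _ hlo]
    have hcast : ((i : Int)).toNat = i := rfl
    split_ifs <;> omega
  · rw [if_neg h]
    have : ¬ (p.1 ≤ (i : Int) ∧ (i : Int) ≤ p.2) := by omega
    simp [this]

theorem pvPre_delta (cfg : List (Int × Int)) (i : Nat) (hi : i < 8) :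
    pvPre i (cfg.foldl pvStep (List.replicate 9 0)) = pvCnt cfg (i : Int) := by
  induction cfg using List.reverseRecOn with
  | nil =>
      rw [List.foldl_nil, pvPre_eq_sum]
      have h : ∀ k ∈ Finset.range (i + 1), (List.replicate 9 (0 : Int)).getD k 0 = 0 := by
        intro k _
        rcases Nat.lt_or_ge k 9 with hk | hk
        · rw [List.getD_eq_getElem _ _ (by simpa using hk)]
          exact List.getElem_replicate _
        · rw [List.getD_eq_default _ _ (by simpa using hk)]
      rw [Finset.sum_congr rfl h]
      simp [pvCnt]
  | append_singleton xs p ih =>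
      rw [List.foldl_append, List.foldl_cons, List.foldl_nil,
        pvPre_pvStep i _ p (by rw [length_foldl_pvStep]; rfl) hi, ih]
      unfold pvCnt
      rw [List.foldl_append, List.foldl_cons, List.foldl_nil]
      split_ifs <;> simp

-- A's result, channel by channel
theorem countA_eq (cfg : List (Int × Int)) :
    count_channel_users cfg =
      [pvCnt cfg 0, pvCnt cfg 1, pvCnt cfg 2, pvCnt cfg 3,
       pvCnt cfg 4, pvCnt cfg 5, pvCnt cfg 6, pvCnt cfg 7] := rfl

-- B's result, channel by channel
theorem countB_eq (cfg : List (Int × Int)) :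
    count_channel_users_alt cfg =
      [pvPre 0 (cfg.foldl pvStep (List.replicate 9 0)),
       pvPre 1 (cfg.foldl pvStep (List.replicate 9 0)),
       pvPre 2 (cfg.foldl pvStep (List.replicate 9 0)),
       pvPre 3 (cfg.foldl pvStep (List.replicate 9 0)),
       pvPre 4 (cfg.foldl pvStep (List.replicate 9 0)),
       pvPre 5 (cfg.foldl pvStep (List.replicate 9 0)),
       pvPre 6 (cfg.foldl pvStep (List.replicate 9 0)),
       pvPre 7 (cfg.foldl pvStep (List.replicate 9 0))] := rfl

-- ===== VERDICT (by name: the statement is the Claim_ definition above) =====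
theorem count_channel_users_spec : Claim_equal_count_channel_users := by
  intro cfg _
  unfold Spec_count_channel_users
  rw [countA_eq, countB_eq]
  have h0 := pvPre_delta cfg 0 (by omega)
  have h1 := pvPre_delta cfg 1 (by omega)
  have h2 := pvPre_delta cfg 2 (by omega)
  have h3 := pvPre_delta cfg 3 (by omega)
  have h4 := pvPre_delta cfg 4 (by omega)
  have h5 := pvPre_delta cfg 5 (by omega)
  have h6 := pvPre_delta cfg 6 (by omega)
  have h7 := pvPre_delta cfg 7 (by omega)
  simp only [Nat.cast_ofNat, Nat.cast_zero, Nat.cast_one] at h0 h1 h2 h3 h4 h5 h6 h7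
  rw [h0, h1, h2, h3, h4, h5, h6, h7]
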